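-- pv_equiv track=rewrite | github.com/RafaelaCamp/Python-Learn | PythonUSP/Semana7/Exercício4/soma_hipotenusas.py | soma_hipotenusas
-- ===== SOURCE A (Python) =====
-- def e_hipotenusa(a, b):
--     hipotenusa = ((a **2) + (b **2))
--     return hipotenusa
--
-- def soma_hipotenusas(n):
--     c = 1
--     soma = 0
--     for c in range(n+1):
--         c2 = c**2
--         a = 1
--         b = 1
--         while (a < n):
--             while (b < n):
--                 if c2 == e_hipotenusa(a, b):
--                     soma = soma + c
--                     a = n
--                     break
--                 b += 1
--             a += 1
--             b = a
--         c += 1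
--     return soma
-- ===== SOURCE B (Python) =====
-- def soma_hipotenusas(n):
--     sums = {a * a + b * b for a in range(1, n) for b in range(a, n)}
--     return sum(c for c in range(n + 1) if c * c in sums)
-- ===== Notes on version B (the rewrite author's own statement) =====
-- stated objective: faster
-- what changed: Replaces the per-c quadratic nested while-loop search (cubic total) by precomputing once the set of all sums of two squared legs below n and testing each squared c by hash membership.
import Mathlib
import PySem

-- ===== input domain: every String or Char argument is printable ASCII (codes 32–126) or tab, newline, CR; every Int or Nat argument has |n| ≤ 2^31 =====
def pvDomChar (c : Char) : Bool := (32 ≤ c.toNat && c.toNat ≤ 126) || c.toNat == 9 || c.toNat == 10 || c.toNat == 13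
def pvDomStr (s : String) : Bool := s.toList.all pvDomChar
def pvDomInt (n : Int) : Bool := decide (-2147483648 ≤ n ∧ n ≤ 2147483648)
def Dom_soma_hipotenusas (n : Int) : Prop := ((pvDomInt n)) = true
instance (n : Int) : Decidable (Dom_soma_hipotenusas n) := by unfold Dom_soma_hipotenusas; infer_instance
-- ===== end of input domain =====

-- B replaces A's per-c nested while-loop search by a precomputed set of the sums of two
-- squared positive legs below n, tested by membership per c: asymptotically faster, same values.

-- ===== PORT A =====
def e_hipotenusa (a b : Int) : Int := a ^ 2 + b ^ 2

-- inner 'while b < n' loop of A: returns whether c2 was found (A then sets a = n and breaks)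
def pvLoopB (n c2 a b : Int) : Bool :=
  if _h : b < n then
    if c2 = e_hipotenusa a b then true
    else pvLoopB n c2 a (b + 1)
  else false
termination_by (n - b).toNat
decreasing_by omega

-- outer 'while a < n' loop of A: after 'a += 1; b = a' the next iteration starts at (a+1, a+1)
def pvLoopA (n c2 a b : Int) : Bool :=
  if _h : a < n then
    if pvLoopB n c2 a b then true
    else pvLoopA n c2 (a + 1) (a + 1)
  else false
termination_by (n - a).toNat
decreasing_by omega

def soma_hipotenusas (n : Int) : Int :=
  (PySem.List.pyRange 0 (n + 1) 1).foldl
    (fun soma c => if pvLoopA n (c ^ 2) 1 1 then soma + c else soma) 0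

-- ===== PORT B =====
-- set comprehension {a*a + b*b for a in range(1, n) for b in range(a, n)}
def pvSums (n : Int) : PySem.Set Int :=
  (PySem.List.pyRange 1 n 1).foldl
    (fun s a => (PySem.List.pyRange a n 1).foldl
      (fun s b => PySem.Set.add s (a * a + b * b)) s)
    PySem.Set.empty

def soma_hipotenusas_alt (n : Int) : Int :=
  let sums := pvSums n
  (PySem.List.pyRange 0 (n + 1) 1).foldl
    (fun acc c => if PySem.Set.contains sums (c * c) then acc + c else acc) 0

-- ===== PRECONDITION & SPEC =====
def Spec_soma_hipotenusas (n : Int) (out : Int) : Prop := out = soma_hipotenusas_alt n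
instance (n : Int) (out : Int) : Decidable (Spec_soma_hipotenusas n out) := by unfold Spec_soma_hipotenusas; infer_instance

-- ===== CLAIM (what is proved, stated in full; the proofs are below) =====
def Claim_equal_soma_hipotenusas : Prop := ∀ (n : Int), Dom_soma_hipotenusas n → Spec_soma_hipotenusas n (soma_hipotenusas n)

-- ===== LEMMAS AND PROOFS =====

theorem loopB_iff (n c2 a : Int) : ∀ (b : Int),
    pvLoopB n c2 a b = true ↔ ∃ k, b ≤ k ∧ k < n ∧ c2 = a ^ 2 + k ^ 2 := by
  have H : ∀ (m : Nat) (b : Int), (n - b).toNat ≤ m →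
      (pvLoopB n c2 a b = true ↔ ∃ k, b ≤ k ∧ k < n ∧ c2 = a ^ 2 + k ^ 2) := by
    intro m
    induction m with
    | zero =>
      intro b hb
      have hnb : ¬ b < n := by omega
      rw [pvLoopB]
      simp only [hnb, dite_false]
      constructor
      · intro h; cases h
      · rintro ⟨k, h1, h2, -⟩; omega
    | succ m ih =>
      intro b hb
      rw [pvLoopB]
      by_cases h : b < n
      · simp only [h, dite_true]
        by_cases hf : c2 = e_hipotenusa a b
        · rw [if_pos hf]
          constructor
          · intro _; exact ⟨b, le_refl b, h, hf⟩
          · intro _; rfl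
        · rw [if_neg hf]
          rw [ih (b + 1) (by omega)]
          constructor
          · rintro ⟨k, h1, h2, h3⟩; exact ⟨k, by omega, h2, h3⟩
          · rintro ⟨k, h1, h2, h3⟩
            rcases lt_or_eq_of_le h1 with hlt | heq
            · exact ⟨k, by omega, h2, h3⟩
            · exact absurd (heq ▸ h3) hf
      · simp only [h, dite_false]
        constructor
        · intro hc; cases hc
        · rintro ⟨k, h1, h2, -⟩; omega
  intro b
  exact H (n - b).toNat b (le_refl _)

theorem loopA_iff (n c2 : Int) : ∀ (a : Int),
    pvLoopA n c2 a a = true ↔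
      ∃ i, a ≤ i ∧ i < n ∧ ∃ k, i ≤ k ∧ k < n ∧ c2 = i ^ 2 + k ^ 2 := by
  have H : ∀ (m : Nat) (a : Int), (n - a).toNat ≤ m →
      (pvLoopA n c2 a a = true ↔
        ∃ i, a ≤ i ∧ i < n ∧ ∃ k, i ≤ k ∧ k < n ∧ c2 = i ^ 2 + k ^ 2) := by
    intro m
    induction m with
    | zero =>
      intro a ha
      have hna : ¬ a < n := by omega
      rw [pvLoopA]
      simp only [hna, dite_false]
      constructor
      · intro h; cases h
      · rintro ⟨i, h1, h2, -⟩; omega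
    | succ m ih =>
      intro a ha
      rw [pvLoopA]
      by_cases h : a < n
      · simp only [h, dite_true]
        by_cases hB : pvLoopB n c2 a a = true
        · rw [if_pos hB]
          obtain ⟨k, hk1, hk2, hk3⟩ := (loopB_iff n c2 a a).mp hB
          constructor
          · intro _; exact ⟨a, le_refl a, h, k, hk1, hk2, hk3⟩
          · intro _; rfl
        · rw [if_neg hB]
          rw [ih (a + 1) (by omega)]
          constructor
          · rintro ⟨i, h1, h2, hrest⟩; exact ⟨i, by omega, h2, hrest⟩
          · rintro ⟨i, h1, h2, k, h3, h4, h5⟩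
            rcases lt_or_eq_of_le h1 with hlt | heq
            · exact ⟨i, by omega, h2, k, h3, h4, h5⟩
            · exact absurd ((loopB_iff n c2 a a).mpr ⟨k, heq ▸ h3, h4, heq ▸ h5⟩) hB
      · simp only [h, dite_false]
        constructor
        · intro hc; cases hc
        · rintro ⟨i, h1, h2, -⟩; omega
  intro a
  exact H (n - a).toNat a (le_refl _)

theorem mem_inner (x a : Int) : ∀ (l : List Int) (s : PySem.Set Int),
    (x ∈ l.foldl (fun s b => PySem.Set.add s (a * a + b * b)) s ↔
      x ∈ s ∨ ∃ b ∈ l, x = a * a + b * b) := by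
  intro l
  induction l with
  | nil => intro s; simp
  | cons hd tl ih =>
    intro s
    simp only [List.foldl_cons, ih, PySem.Set.mem_add, List.mem_cons]
    constructor
    · rintro ((h | h) | ⟨b, hb, he⟩)
      · exact Or.inl h
      · exact Or.inr ⟨hd, Or.inl rfl, h⟩
      · exact Or.inr ⟨b, Or.inr hb, he⟩
    · rintro (h | ⟨b, (rfl | hb), he⟩)
      · exact Or.inl (Or.inl h)
      · exact Or.inl (Or.inr he)
      · exact Or.inr ⟨b, hb, he⟩

theorem mem_sums_gen (x n : Int) : ∀ (l : List Int) (s : PySem.Set Int),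
    (x ∈ l.foldl (fun s a => (PySem.List.pyRange a n 1).foldl
        (fun s b => PySem.Set.add s (a * a + b * b)) s) s ↔
      x ∈ s ∨ ∃ a ∈ l, ∃ b, a ≤ b ∧ b < n ∧ x = a * a + b * b) := by
  intro l
  induction l with
  | nil => intro s; simp
  | cons hd tl ih =>
    intro s
    simp only [List.foldl_cons, ih, mem_inner x hd, PySem.List.mem_pyRange_one, List.mem_cons]
    constructor
    · rintro ((h | ⟨b, ⟨hb1, hb2⟩, he⟩) | ⟨a, ha, hrest⟩)
      · exact Or.inl h
      · exact Or.inr ⟨hd, Or.inl rfl, b, hb1, hb2, he⟩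
      · exact Or.inr ⟨a, Or.inr ha, hrest⟩
    · rintro (h | ⟨a, (rfl | ha), b, hb1, hb2, he⟩)
      · exact Or.inl (Or.inl h)
      · exact Or.inl (Or.inr ⟨b, ⟨hb1, hb2⟩, he⟩)
      · exact Or.inr ⟨a, ha, b, hb1, hb2, he⟩

theorem mem_sums (x n : Int) :
    x ∈ pvSums n ↔ ∃ a, 1 ≤ a ∧ a < n ∧ ∃ b, a ≤ b ∧ b < n ∧ x = a * a + b * b := by
  unfold pvSums
  rw [mem_sums_gen]
  simp only [PySem.List.mem_pyRange_one]
  constructor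
  · rintro (h | ⟨a, ⟨ha1, ha2⟩, hrest⟩)
    · cases h
    · exact ⟨a, ha1, ha2, hrest⟩
  · rintro ⟨a, ha1, ha2, hrest⟩
    exact Or.inr ⟨a, ⟨ha1, ha2⟩, hrest⟩

theorem cond_eq (n c : Int) :
    pvLoopA n (c ^ 2) 1 1 = PySem.Set.contains (pvSums n) (c * c) := by
  rw [Bool.eq_iff_iff, loopA_iff, PySem.Set.contains_iff, mem_sums]
  constructor
  · rintro ⟨i, h1, h2, k, h3, h4, h5⟩
    refine ⟨i, h1, h2, k, h3, h4, ?_⟩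
    simp only [pow_two] at h5
    exact h5
  · rintro ⟨a, h1, h2, b, h3, h4, h5⟩
    refine ⟨a, h1, h2, b, h3, h4, ?_⟩
    simp only [pow_two]
    exact h5

-- ===== VERDICT (by name: the statement is the Claim_ definition above) =====
theorem soma_hipotenusas_spec : Claim_equal_soma_hipotenusas := by
  intro n _
  unfold Spec_soma_hipotenusas soma_hipotenusas soma_hipotenusas_alt
  congr 1
  funext acc c
  rw [cond_eq]
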